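-- pv_equiv track=rewrite | github.com/ParasAvkirkar/SpeechWork | wiki_command.py | get_list_of_keywords
-- ===== SOURCE A (Python) =====
-- def get_list_of_keywords(text_spoke):
-- 	is_wiki_tag_found = False
-- 	keyword_list = []
-- 	for word in text_spoke.split():
-- 		if is_wiki_tag_found:
-- 			keyword_list.append(word)
-- 		if 'wiki' in word:
-- 			is_wiki_tag_found = True
--
-- 	return keyword_list
-- ===== SOURCE B (Python) =====
-- def get_list_of_keywords(text_spoke):
--     words = text_spoke.split()
--     idx = next((i for i, w in enumerate(words) if 'wiki' in w), None)
--     if idx is None: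
--         return []
--     return words[idx + 1:]
-- ===== Notes on version B (the rewrite author's own statement) =====
-- stated objective: simpler
-- what changed: Replaces the stateful flag-accumulation loop with a locate-pivot-then-slice decomposition: find the index of the first tagged word, return the suffix after it (or [] if none).
import Mathlib
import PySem

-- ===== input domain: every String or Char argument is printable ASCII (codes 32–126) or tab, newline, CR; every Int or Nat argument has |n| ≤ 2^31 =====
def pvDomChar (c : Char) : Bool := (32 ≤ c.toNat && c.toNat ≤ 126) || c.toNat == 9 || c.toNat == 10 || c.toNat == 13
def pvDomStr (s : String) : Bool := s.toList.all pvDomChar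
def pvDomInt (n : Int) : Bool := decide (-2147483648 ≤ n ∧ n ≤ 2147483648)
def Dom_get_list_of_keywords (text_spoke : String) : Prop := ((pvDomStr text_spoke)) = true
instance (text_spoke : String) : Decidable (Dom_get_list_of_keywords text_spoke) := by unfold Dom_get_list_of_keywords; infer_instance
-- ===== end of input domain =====

-- B replaces A's stateful flag-accumulation loop with find-first-'wiki'-word-then-slice; objective: simpler.

-- ===== PORT A =====
-- one loop step: if flag then append word; if 'wiki' in word then set flag
def pvStepA (st : Bool × List String) (word : String) : Bool × List String :=
  let acc := if st.1 then st.2 ++ [word] else st.2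
  (st.1 || PySem.Str.isIn "wiki" word, acc)

def get_list_of_keywords (text_spoke : String) : List String :=
  ((PySem.Str.split₀ text_spoke).foldl pvStepA (false, [])).2

-- ===== PORT B =====
def get_list_of_keywords_alt (text_spoke : String) : List String :=
  let words := PySem.Str.split₀ text_spoke
  match words.findIdx? (fun w => PySem.Str.isIn "wiki" w) with
  | none => []
  | some idx => words.drop (idx + 1)   -- words[idx+1:] with idx+1 ≥ 0

-- ===== PRECONDITION & SPEC =====
def Spec_get_list_of_keywords (text_spoke : String) (out : List String) : Prop := out = get_list_of_keywords_alt text_spoke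
instance (text_spoke : String) (out : List String) : Decidable (Spec_get_list_of_keywords text_spoke out) := by unfold Spec_get_list_of_keywords; infer_instance

-- ===== CLAIM =====
def Claim_equal_get_list_of_keywords : Prop := ∀ (text_spoke : String), Dom_get_list_of_keywords text_spoke → Spec_get_list_of_keywords text_spoke (get_list_of_keywords text_spoke)

-- ===== LEMMAS AND PROOFS =====
-- once the flag is true, A's loop appends every remaining word
theorem foldl_stepA_true (ws : List String) (acc : List String) :
    (ws.foldl pvStepA (true, acc)).2 = acc ++ ws := by
  induction ws generalizing acc with
  | nil => simp
  | cons w ws ih => simp [pvStepA, ih]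

-- with the flag still false, A's loop computes "locate first 'wiki' word, take the rest"
theorem foldl_stepA_false (ws : List String) (acc : List String) :
    (ws.foldl pvStepA (false, acc)).2 =
      match ws.findIdx? (fun w => PySem.Str.isIn "wiki" w) with
      | none => acc
      | some idx => acc ++ ws.drop (idx + 1) := by
  induction ws generalizing acc with
  | nil => simp
  | cons w ws ih =>
    rw [List.foldl_cons]
    by_cases h : PySem.Str.isIn "wiki" w = true
    · rw [show pvStepA (false, acc) w = (true, acc) from by
        simp only [pvStepA, Bool.false_or, h]; rfl]
      rw [foldl_stepA_true, List.findIdx?_cons]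
      simp only [h, if_true, List.drop_succ_cons, List.drop_zero]
    · rw [show pvStepA (false, acc) w = (false, acc) from by
        simp only [pvStepA, Bool.false_or, h]; rfl]
      rw [ih, List.findIdx?_cons, if_neg h]
      cases hf : ws.findIdx? (fun w => PySem.Str.isIn "wiki" w) with
      | none => simp [hf]
      | some i => simp [hf, List.drop_succ_cons]

-- ===== VERDICT =====
theorem get_list_of_keywords_spec : Claim_equal_get_list_of_keywords := by
  intro text _
  unfold Spec_get_list_of_keywords get_list_of_keywords get_list_of_keywords_alt
  rw [foldl_stepA_false]
  cases hf : (PySem.Str.split₀ text).findIdx? (fun w => PySem.Str.isIn "wiki" w) with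
  | none => simp only [hf]
  | some i => simp only [hf]; rw [List.nil_append]
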